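-- pv_equiv track=rewrite | github.com/GT09Neil/Algoritmos-ETL | data_unifier.py | build_master_dataset
-- ===== SOURCE A (Python) =====
-- def build_master_dataset(aligned_data):
--     """
--     Construye el dataset maestro unificado: una lista de diccionarios, cada uno
--     con "Date" y una columna por activo para Close (ej. VOO_Close, EC_Close).
--
--     Algoritmo formal:
--       Entrada: aligned_data = dict symbol -> list of dict; todas las listas tienen
--                la misma longitud y el mismo orden de fechas (Date en cada fila).
--       Salida: list of dict con keys "Date" y "SYMBOL_Close" para cada symbol.
--               Cada elemento corresponde a una fecha; los valores Close pueden ser None.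
--
--       Pseudocódigo:
--         symbols <- lista de claves de aligned_data (orden estable)
--         n <- longitud de cualquier lista en aligned_data (ej. aligned_data[symbols[0]])
--         master <- []
--         para i en 0..n-1:
--           row <- {"Date": aligned_data[symbols[0]][i]["Date"]}
--           para cada symbol en symbols:
--             row[symbol + "_Close"] <- aligned_data[symbol][i].get("Close")
--           master.append(row)
--         retornar master
--
--     Complejidad temporal: O(k · n).
--       - k = número de activos, n = número de filas (fechas).
--       - Un bucle sobre n; dentro, un bucle sobre k para leer Close de cada activo.
--       - Acceso a aligned_data[symbol][i] es O(1) (list por índice, dict por clave).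
--
--     Justificación estructura de salida:
--       - list de dict permite exportar a CSV de forma natural (una fila por elemento,
--         columnas = claves del dict). El uso de dict por fila permite O(1) por
--         acceso a columna al generar o escribir.
--     """
--     symbols = sorted(aligned_data.keys())
--     if not symbols:
--         return []
--     n = len(aligned_data[symbols[0]])
--     master = []
--     for i in range(n):
--         row = {"Date": aligned_data[symbols[0]][i]["Date"]}
--         for symbol in symbols:
--             row[symbol + "_Close"] = aligned_data[symbol][i].get("Close")
--         master.append(row)
--     return master
-- ===== SOURCE B (Python) =====
-- def build_master_dataset(aligned_data):
--     # Columnar assembly: extract the Date column and one Close column per symbol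
--     # as full lists, then transpose with zip(*cols) and build each row dict in a
--     # single dict(zip(header, values)) call (no per-row insertion loop).
--     symbols = sorted(aligned_data.keys())
--     if not symbols:
--         return []
--     n = len(aligned_data[symbols[0]])
--     header = ["Date"] + [s + "_Close" for s in symbols]
--     cols = [[row["Date"] for row in aligned_data[symbols[0]]]]
--     cols += [[aligned_data[s][i].get("Close") for i in range(n)] for s in symbols]
--     return [dict(zip(header, vals)) for vals in zip(*cols)]
-- ===== Notes on version B (the rewrite author's own statement) =====
-- stated objective: alternative
-- what changed: B is columnar: it extracts the Date column and one Close column per symbol as whole lists, then transposes them with zip(*cols) and builds each row dict in a single dict(zip(header, values)) call, instead of A's row-major nested loops that insert key by key into each row.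
import Mathlib
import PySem

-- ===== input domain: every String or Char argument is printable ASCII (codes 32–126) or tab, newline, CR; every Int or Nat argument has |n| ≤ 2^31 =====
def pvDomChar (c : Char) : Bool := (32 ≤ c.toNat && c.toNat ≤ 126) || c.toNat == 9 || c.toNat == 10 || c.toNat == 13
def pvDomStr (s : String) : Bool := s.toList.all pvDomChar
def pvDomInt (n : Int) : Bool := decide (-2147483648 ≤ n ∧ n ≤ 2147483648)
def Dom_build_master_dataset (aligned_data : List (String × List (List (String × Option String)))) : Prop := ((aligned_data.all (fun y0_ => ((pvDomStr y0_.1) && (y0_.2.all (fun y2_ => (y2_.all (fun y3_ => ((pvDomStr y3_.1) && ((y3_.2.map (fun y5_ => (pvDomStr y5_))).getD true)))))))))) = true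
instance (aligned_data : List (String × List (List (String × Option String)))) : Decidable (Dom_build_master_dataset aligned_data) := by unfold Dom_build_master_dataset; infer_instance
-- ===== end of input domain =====

-- B assembles the result column-wise: it extracts the Date column and one Close column per
-- symbol as whole lists, transposes them with zip(*cols) and builds each row dict in one
-- dict(zip(header, values)) call, instead of A's row-major nested insertion loops; same
-- asymptotic cost, alternative algorithm. Return-value equivalence only (no mutation).

-- ===== PORT A =====
def build_master_dataset (aligned_data : List (String × List (List (String × Option String)))) : List (List (String × Option String)) :=
  let d := PySem.Dict.ofList aligned_data
  let symbols := PySem.List.sorted d.keys (fun s => s.toList) false  -- sorted(): code-point lexicographic order, Python-exact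
  if symbols.isEmpty then [] else
  let s0 := symbols.headD ""
  let lst0 := d.getD s0 []
  let n := lst0.length
  (List.range n).foldl (fun master i =>
    let row : PySem.Dict String (Option String) :=
      PySem.Dict.empty.insert "Date" (((PySem.Dict.ofList (lst0.getD i [])).get? "Date").getD none)
    let row := symbols.foldl (fun row s =>
      row.insert (s ++ "_Close") ((PySem.Dict.ofList ((d.getD s []).getD i [])).getD "Close" none)) row
    master ++ [row.items]) []

-- ===== PORT B =====
-- zip(*cols): rows up to the shortest column (exact: every index read is below each length)
def pvZipStar (cols : List (List (Option String))) : List (List (Option String)) :=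
  match cols with
  | [] => []
  | c :: cs =>
    (List.range (cs.foldl (fun a x => min a x.length) c.length)).map
      (fun i => (c :: cs).map (fun col => col.getD i none))

def build_master_dataset_alt (aligned_data : List (String × List (List (String × Option String)))) : List (List (String × Option String)) :=
  let d := PySem.Dict.ofList aligned_data
  let symbols := PySem.List.sorted d.keys (fun s => s.toList) false  -- sorted(): code-point lexicographic order, Python-exact
  if symbols.isEmpty then [] else
  let s0 := symbols.headD ""
  let n := (d.getD s0 []).length
  let header := "Date" :: symbols.map (fun s => s ++ "_Close")
  let cols : List (List (Option String)) :=
    ((d.getD s0 []).map (fun row => ((PySem.Dict.ofList row).get? "Date").getD none))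
    :: symbols.map (fun s => (List.range n).map (fun i =>
         (PySem.Dict.ofList ((d.getD s []).getD i [])).getD "Close" none))
  (pvZipStar cols).map (fun vals => (PySem.Dict.ofList (header.zip vals)).items)

-- ===== PRECONDITION & SPEC =====
-- Pre_ holds exactly where the Python A returns: every symbol's list is at least as long as
-- the first (sorted) symbol's list, and every row of that first list has a "Date" key
-- (otherwise A raises IndexError resp. KeyError).
def Pre_build_master_dataset (aligned_data : List (String × List (List (String × Option String)))) : Prop :=
  let d := PySem.Dict.ofList aligned_data
  let symbols := PySem.List.sorted d.keys (fun s => s.toList) false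
  symbols = [] ∨
    (let s0 := symbols.headD ""
     let lst0 := d.getD s0 []
     (∀ s ∈ d.keys, lst0.length ≤ (d.getD s []).length) ∧
     (∀ row ∈ lst0, (PySem.Dict.ofList row).contains "Date" = true))
instance (aligned_data : List (String × List (List (String × Option String)))) : Decidable (Pre_build_master_dataset aligned_data) := by unfold Pre_build_master_dataset; infer_instance

def pvWitness_build_master_dataset : (List (String × List (List (String × Option String)))) :=
  [("VOO", [[("Date", some "2024-01-02"), ("Close", some "430.1")],
            [("Date", some "2024-01-03"), ("Close", none)]]),
   ("EC",  [[("Date", some "2024-01-02"), ("Close", some "12.0")],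
            [("Date", some "2024-01-03"), ("Close", some "12.5")]])]

def Spec_build_master_dataset (aligned_data : List (String × List (List (String × Option String)))) (out : List (List (String × Option String))) : Prop := out = build_master_dataset_alt aligned_data
instance (aligned_data : List (String × List (List (String × Option String)))) (out : List (List (String × Option String))) : Decidable (Spec_build_master_dataset aligned_data out) := by unfold Spec_build_master_dataset; infer_instance

-- ===== CLAIM (what is proved, stated in full; the proofs are below) =====
def Claim_equal_build_master_dataset : Prop := ∀ (aligned_data : List (String × List (List (String × Option String)))), Dom_build_master_dataset aligned_data → Pre_build_master_dataset aligned_data → Spec_build_master_dataset aligned_data (build_master_dataset aligned_data)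

-- ===== LEMMAS AND PROOFS =====

-- the min-length fold of zip(*cols) is n when every column has length n
theorem foldl_min_map_const {α : Type} (ss : List α) (colF : α → List (Option String)) (n : Nat)
    (h : ∀ s, (colF s).length = n) :
    (ss.map colF).foldl (fun a x => min a x.length) n = n := by
  induction ss with
  | nil => rfl
  | cons s ss ih => simp only [List.map_cons, List.foldl_cons, h s, min_self]; exact ih

-- getD through map below the length
theorem getD_map_of_lt {α β : Type} (l : List α) (f : α → β) (i : Nat) (h : i < l.length)
    (dfl : β) (dfl' : α) : (l.map f).getD i dfl = f (l.getD i dfl') := by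
  simp [List.getD, h]

-- dict(zip(header, pairs)) with a fresh head key is A's row-insertion fold
theorem dict_ofList_cons_map {κ ν α : Type} [BEq κ] (k : κ) (v : ν) (ss : List α)
    (f : α → κ) (h : α → ν) :
    PySem.Dict.ofList ((k, v) :: ss.map (fun s => (f s, h s)))
      = ss.foldl (fun row s => row.insert (f s) (h s)) (PySem.Dict.empty.insert k v) := by
  show (((k, v) :: ss.map (fun s => (f s, h s))).foldl
      (fun d p => d.insert p.1 p.2) PySem.Dict.empty) = _
  rw [List.foldl_cons, List.foldl_map]

-- ===== VERDICT (by name: the statement is the Claim_ definition above) =====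
theorem build_master_dataset_spec : Claim_equal_build_master_dataset := by
  intro ad _ _
  unfold Spec_build_master_dataset build_master_dataset build_master_dataset_alt
  simp only []
  split
  · rfl
  · rw [PySem.List.foldl_append_singleton_eq_map]
    unfold pvZipStar
    simp only []
    set d := PySem.Dict.ofList ad
    set symbols := PySem.List.sorted d.keys (fun s => s.toList) false
    set s0 := symbols.headD ""
    set lst0 := d.getD s0 []
    set n := lst0.length with hn
    have hmin : (symbols.map (fun s => (List.range n).map (fun i =>
        (PySem.Dict.ofList ((d.getD s []).getD i [])).getD "Close" none))).foldl
        (fun a x => min a x.length)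
        ((lst0.map (fun row => ((PySem.Dict.ofList row).get? "Date").getD none)).length) = n := by
      rw [List.length_map, ← hn]
      exact foldl_min_map_const _ _ n (fun s => by simp)
    rw [hmin, List.map_map]
    refine List.map_congr_left (fun i hi => ?_)
    have hi := List.mem_range.mp hi
    simp only [Function.comp, List.map_cons, List.map_map]
    rw [getD_map_of_lt lst0 _ i hi none []]
    have hcols : symbols.map ((fun col => col.getD i none) ∘ fun s =>
          (List.range n).map (fun j =>
            (PySem.Dict.ofList ((d.getD s []).getD j [])).getD "Close" none))
        = symbols.map (fun s =>
          (PySem.Dict.ofList ((d.getD s []).getD i [])).getD "Close" none) := by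
      refine List.map_congr_left (fun s _ => ?_)
      simp only [Function.comp_apply]
      exact PySem.List.getD_map_range _ _ _ _ hi
    rw [hcols, List.zip_cons_cons, List.zip_map']
    rw [dict_ofList_cons_map]
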